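-- pv_equiv track=rewrite | github.com/jennharw/Algorithm | test2.py | mock_exam
-- ===== SOURCE A (Python) =====
-- def mock_exam(answers):
--
--     x = [1,2,3,4,5] #5
--
--     y = [2,1,2,3,2,4,2,5] #8
--
--     z = [3,3,1,1,2,2,4,4,5,5] #10
--
--     x_ = 0
--     y_ = 0
--     z_ = 0
--     for i, wer  in enumerate(answers):
--
--         if x[i%5] == wer:
--             x_ += 1
--
--         if y[i % 8] == wer:
--             y_ += 1
--
--         if z[i % 10] == wer:
--             z_ += 1
--     list1 = [x_, y_, z_]
--     mx = max(list1)
--     result = []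
--     for i in range(len(list1)):
--         if list1[i] == mx:
--             result.append(i+1)
--
--     return result
-- ===== SOURCE B (Python) =====
-- def mock_exam(answers):
--     # Histogram of (index mod 40, answer) pairs, built once; 40 = lcm of the
--     # three pattern lengths, so each pattern's score is read off the histogram
--     # in O(1) per residue class instead of rescanning the answers.
--     hist = {}
--     for i, a in enumerate(answers):
--         key = (i % 40, a)
--         hist[key] = hist.get(key, 0) + 1
--     patterns = [[1, 2, 3, 4, 5],
--                 [2, 1, 2, 3, 2, 4, 2, 5],
--                 [3, 3, 1, 1, 2, 2, 4, 4, 5, 5]]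
--     scores = [sum(hist.get((j, p[j % len(p)]), 0) for j in range(40))
--               for p in patterns]
--     mx = max(scores)
--     return [k + 1 for k, s in enumerate(scores) if s == mx]
-- ===== Notes on version B (the rewrite author's own statement) =====
-- stated objective: alternative
-- what changed: B replaces A's per-element check against all three patterns with a histogram of (index mod 40, answer) pairs built once (40 = lcm of the pattern lengths), from which each pattern's score is read off as a 40-term sum of dictionary lookups instead of testing every answer against every pattern.
import Mathlib
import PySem

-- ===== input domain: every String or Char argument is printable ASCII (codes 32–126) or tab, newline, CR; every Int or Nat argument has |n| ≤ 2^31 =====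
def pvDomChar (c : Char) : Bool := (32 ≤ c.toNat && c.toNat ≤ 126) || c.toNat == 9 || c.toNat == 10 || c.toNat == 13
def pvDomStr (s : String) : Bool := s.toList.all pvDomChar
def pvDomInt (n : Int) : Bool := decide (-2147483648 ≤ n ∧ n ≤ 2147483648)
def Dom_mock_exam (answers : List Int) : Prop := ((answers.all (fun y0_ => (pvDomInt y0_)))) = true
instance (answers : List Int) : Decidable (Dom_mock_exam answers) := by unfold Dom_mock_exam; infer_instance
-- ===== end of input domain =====

-- B scores via a histogram of (index mod 40, answer) pairs built in one pass
-- (40 = lcm of the pattern lengths), each pattern's score then being a 40-term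
-- sum of histogram lookups; alternative algorithm, same asymptotic cost.

-- ===== PORT A =====
-- one pass over enumerate(answers) carrying the three counters (x_, y_, z_)
def mock_exam (answers : List Int) : List Int :=
  let x : List Int := [1, 2, 3, 4, 5]
  let y : List Int := [2, 1, 2, 3, 2, 4, 2, 5]
  let z : List Int := [3, 3, 1, 1, 2, 2, 4, 4, 5, 5]
  let s := (PySem.List.enumerate answers).foldl
    (fun (acc : Int × Int × Int) (p : Int × Int) =>
      let a1 := if PySem.List.pyGetD x (p.1 % 5) 0 = p.2 then (acc.1 + 1, acc.2.1, acc.2.2) else acc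
      let a2 := if PySem.List.pyGetD y (p.1 % 8) 0 = p.2 then (a1.1, a1.2.1 + 1, a1.2.2) else a1
      if PySem.List.pyGetD z (p.1 % 10) 0 = p.2 then (a2.1, a2.2.1, a2.2.2 + 1) else a2)
    (0, 0, 0)
  let list1 : List Int := [s.1, s.2.1, s.2.2]
  let mx := (PySem.List.max? list1 (fun v => v)).getD 0  -- list1 is nonempty, max? = some
  (List.range list1.length).foldl
    (fun r i => if list1.getD i 0 = mx then r ++ [(i : Int) + 1] else r) []

-- ===== PORT B =====
-- B's histogram: hist[key] = hist.get(key, 0) + 1 over enumerate(answers)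
def pyHist (answers : List Int) : PySem.Dict (Int × Int) Int :=
  (PySem.List.enumerate answers).foldl
    (fun d p => d.insert (p.1 % 40, p.2) (d.getD (p.1 % 40, p.2) 0 + 1)) PySem.Dict.empty

-- B's score of one pattern: sum over the 40 residue classes of histogram lookups
def pyScore (hist : PySem.Dict (Int × Int) Int) (p : List Int) : Int :=
  (PySem.List.pyRange 0 40 1).foldl
    (fun s j => s + hist.getD (j, PySem.List.pyGetD p (j % (p.length : Int)) 0) 0) 0

def mock_exam_alt (answers : List Int) : List Int :=
  let hist := pyHist answers
  let patterns : List (List Int) :=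
    [[1, 2, 3, 4, 5], [2, 1, 2, 3, 2, 4, 2, 5], [3, 3, 1, 1, 2, 2, 4, 4, 5, 5]]
  let scores := patterns.map (fun p => pyScore hist p)
  let mx := (PySem.List.max? scores (fun v => v)).getD 0  -- scores is nonempty
  (PySem.List.enumerate scores).foldl
    (fun r (q : Int × Int) => if q.2 = mx then r ++ [q.1 + 1] else r) []

-- ===== PRECONDITION & SPEC =====
def Spec_mock_exam (answers : List Int) (out : List Int) : Prop := out = mock_exam_alt answers
instance (answers : List Int) (out : List Int) : Decidable (Spec_mock_exam answers out) := by unfold Spec_mock_exam; infer_instance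

-- ===== CLAIM (what is proved, stated in full; the proofs are below) =====
def Claim_equal_mock_exam : Prop := ∀ (answers : List Int), Dom_mock_exam answers → Spec_mock_exam answers (mock_exam answers)

-- ===== LEMMAS AND PROOFS =====

-- A's combined fold over one list of indexed answers splits into three per-pattern folds
theorem fold3 (l : List (Int × Int)) (a b c : Int) :
    l.foldl
      (fun (acc : Int × Int × Int) (p : Int × Int) =>
        let a1 := if PySem.List.pyGetD [1, 2, 3, 4, 5] (p.1 % 5) 0 = p.2 then (acc.1 + 1, acc.2.1, acc.2.2) else acc
        let a2 := if PySem.List.pyGetD [2, 1, 2, 3, 2, 4, 2, 5] (p.1 % 8) 0 = p.2 then (a1.1, a1.2.1 + 1, a1.2.2) else a1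
        if PySem.List.pyGetD [3, 3, 1, 1, 2, 2, 4, 4, 5, 5] (p.1 % 10) 0 = p.2 then (a2.1, a2.2.1, a2.2.2 + 1) else a2)
      (a, b, c)
    = (l.foldl (fun v p => if PySem.List.pyGetD [1, 2, 3, 4, 5] (p.1 % 5) 0 = p.2 then v + 1 else v) a,
       l.foldl (fun v p => if PySem.List.pyGetD [2, 1, 2, 3, 2, 4, 2, 5] (p.1 % 8) 0 = p.2 then v + 1 else v) b,
       l.foldl (fun v p => if PySem.List.pyGetD [3, 3, 1, 1, 2, 2, 4, 4, 5, 5] (p.1 % 10) 0 = p.2 then v + 1 else v) c) := by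
  induction l generalizing a b c with
  | nil => rfl
  | cons h t ih =>
    simp only [List.foldl_cons]
    rw [ih]
    split_ifs <;> rfl

-- the histogram lookup is the count of the key among the (index mod 40, answer) pairs
theorem hist_getD (answers : List Int) (k : Int × Int) :
    (pyHist answers).getD k 0
      = (((PySem.List.enumerate answers).map (fun p => (p.1 % 40, p.2))).count k : Int) := by
  unfold pyHist
  have hm : (PySem.List.enumerate answers).foldl
      (fun d p => d.insert (p.1 % 40, p.2) (d.getD (p.1 % 40, p.2) 0 + 1)) PySem.Dict.empty
    = ((PySem.List.enumerate answers).map (fun p => (p.1 % 40, p.2))).foldl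
      (fun (d : PySem.Dict (Int × Int) Int) (x : Int × Int) => d.insert x (d.getD x 0 + 1))
      PySem.Dict.empty := by rw [List.foldl_map]
  rw [hm, PySem.Dict.getD_foldl_insert_add_one]
  simp [PySem.Dict.empty, PySem.Dict.getD, PySem.Dict.get?]

-- summing an equality indicator over a range counts the single matching index
theorem sum_ind (n : Nat) (a : Int) (f : Int → Int) (q : Int × Int) (s : Int) :
    (PySem.List.pyRange a (a + n) 1).foldl
      (fun s j => s + (if q = (j, f j) then (1 : Int) else 0)) s
    = s + (if a ≤ q.1 ∧ q.1 < a + n ∧ q.2 = f q.1 then 1 else 0) := by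
  obtain ⟨q1, q2⟩ := q
  induction n generalizing a s with
  | zero =>
    rw [PySem.List.pyRange_one_eq_nil (by omega)]
    simp only [List.foldl_nil]
    rw [if_neg (by rintro ⟨h1, h2, _⟩; omega), add_zero]
  | succ m ih =>
    rw [PySem.List.pyRange_one_cons (by push_cast; omega)]
    simp only [List.foldl_cons]
    rw [show a + ((m + 1 : Nat) : Int) = (a + 1) + (m : Nat) by push_cast; ring, ih]
    by_cases h0 : (q1, q2) = (a, f a)
    · rw [if_pos h0]
      rw [Prod.mk.injEq] at h0
      obtain ⟨h0a, h0b⟩ := h0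
      subst h0a; subst h0b
      rw [if_neg (by rintro ⟨h1, _, _⟩; omega)]
      rw [if_pos ⟨le_refl _, by omega, by trivial⟩]
      ring
    · rw [if_neg h0, add_zero]
      congr 1
      by_cases hc : q2 = f q1
      · have hne : q1 ≠ a := by
          intro he
          apply h0
          rw [Prod.mk.injEq]
          exact ⟨he, by rw [hc, he]⟩
        have : ((a + 1 ≤ q1 ∧ q1 < a + 1 + (m : Int) ∧ q2 = f q1) ↔
                (a ≤ q1 ∧ q1 < a + 1 + (m : Int) ∧ q2 = f q1)) := by
          constructor
          · rintro ⟨h1, h2, h3⟩; exact ⟨by omega, h2, h3⟩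
          · rintro ⟨h1, h2, h3⟩; exact ⟨by omega, h2, h3⟩
        rw [if_congr this rfl rfl]
      · rw [if_neg (by rintro ⟨_, _, h3⟩; exact hc h3),
            if_neg (by rintro ⟨_, _, h3⟩; exact hc h3)]

-- splitting a sum-fold over a pointwise sum of summands
theorem foldl_sum_split (r : List Int) (u v : Int → Int) (s t : Int) :
    r.foldl (fun s j => s + (u j + v j)) (s + t)
      = r.foldl (fun s j => s + u j) s + r.foldl (fun s j => s + v j) t := by
  induction r generalizing s t with
  | nil => rfl
  | cons h tl ih =>
    simp only [List.foldl_cons]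
    rw [show s + t + (u h + v h) = (s + u h) + (t + v h) by ring, ih]

-- the 40-term histogram sum equals the direct match count, for any key list within [0,40)
theorem sum_count (l : List (Int × Int)) (f : Int → Int)
    (h : ∀ q ∈ l, 0 ≤ q.1 ∧ q.1 < 40) :
    (PySem.List.pyRange 0 40 1).foldl
      (fun s j => s + ((l.count (j, f j) : Int))) 0
    = l.foldl (fun c q => if f q.1 = q.2 then c + 1 else c) 0 := by
  induction l with
  | nil => simp [PySem.List.pyRange]
  | cons q tl ih =>
    have hq := h q (List.mem_cons_self ..)
    have htl : ∀ p ∈ tl, 0 ≤ p.1 ∧ p.1 < 40 := fun p hp => h p (List.mem_cons_of_mem _ hp)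
    have hcount : ∀ j, ((q :: tl).count (j, f j) : Int)
        = (tl.count (j, f j) : Int) + (if q = (j, f j) then 1 else 0) := by
      intro j
      rw [List.count_cons]
      push_cast
      congr 1
      by_cases he : q = (j, f j) <;> simp [he]
    have : (PySem.List.pyRange 0 40 1).foldl
        (fun s j => s + (((q :: tl).count (j, f j) : Int))) 0
      = (PySem.List.pyRange 0 40 1).foldl
        (fun s j => s + ((tl.count (j, f j) : Int) + (if q = (j, f j) then 1 else 0))) 0 := by
      apply PySem.List.foldl_congr_mem
      intro acc x _; rw [hcount]
    rw [this]
    have hsplit := foldl_sum_split (PySem.List.pyRange 0 40 1)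
      (fun j => (tl.count (j, f j) : Int)) (fun j => if q = (j, f j) then (1:Int) else 0) 0 0
    rw [show ((0:Int) + 0) = 0 from by ring] at hsplit
    rw [hsplit, ih htl]
    have h40 : (40 : Int) = 0 + ((40 : Nat) : Int) := by norm_num
    rw [h40, sum_ind 40 0 f q 0]
    have hin : (0 ≤ q.1 ∧ q.1 < 0 + ((40:Nat):Int) ∧ q.2 = f q.1) ↔ (q.2 = f q.1) := by
      constructor
      · rintro ⟨_, _, h3⟩; exact h3
      · intro h3; exact ⟨hq.1, by push_cast; omega, h3⟩
    -- fold with shifted accumulator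
    have hacc : ∀ (c : Int) (L : List (Int × Int)),
        L.foldl (fun c q => if f q.1 = q.2 then c + 1 else c) c
          = c + L.foldl (fun c q => if f q.1 = q.2 then c + 1 else c) 0 := by
      intro c L
      induction L generalizing c with
      | nil => simp
      | cons x xs ih2 =>
        simp only [List.foldl_cons]
        rw [ih2, @ih2 (if f x.1 = x.2 then (0:Int) + 1 else 0)]
        split_ifs <;> ring
    simp only [List.foldl_cons]
    rw [if_congr hin rfl rfl]
    by_cases hc : q.2 = f q.1
    · rw [if_pos hc, if_pos hc.symm, hacc ((0:Int) + 1) tl]; omega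
    · rw [if_neg hc, if_neg (fun he => hc he.symm)]; omega

-- membership facts about enumerate: indices are ≥ 0 (start 0)
theorem enumerate_fst_nonneg {α : Type} (xs : List α) (p : Int × α)
    (hp : p ∈ PySem.List.enumerate xs) : 0 ≤ p.1 := by
  rw [PySem.List.mem_enumerate_iff] at hp
  obtain ⟨k, hk, rfl⟩ := hp
  simp

-- B's score of a pattern equals A's direct per-pattern count, when len(pattern) divides 40
theorem score_eq (answers : List Int) (p : List Int)
    (hdvd : (p.length : Int) ∣ 40) :
    pyScore (pyHist answers) p
      = (PySem.List.enumerate answers).foldl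
          (fun c q => if PySem.List.pyGetD p (q.1 % (p.length : Int)) 0 = q.2 then c + 1 else c) 0 := by
  unfold pyScore
  have h1 : ∀ (acc j : Int),
      acc + (pyHist answers).getD (j, PySem.List.pyGetD p (j % (p.length : Int)) 0) 0
      = acc + ((((PySem.List.enumerate answers).map (fun q => (q.1 % 40, q.2))).count
          (j, PySem.List.pyGetD p (j % (p.length : Int)) 0) : Int)) := by
    intro acc j; rw [hist_getD]
  rw [PySem.List.foldl_congr_mem _ _ _ _ (fun acc j _ => h1 acc j)]
  rw [sum_count _ (fun j => PySem.List.pyGetD p (j % (p.length : Int)) 0)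
      (by
        intro q hq
        rw [List.mem_map] at hq
        obtain ⟨r, hr, rfl⟩ := hq
        have := Int.emod_nonneg r.1 (by norm_num : (40:Int) ≠ 0)
        have := Int.emod_lt_of_pos r.1 (by norm_num : (0:Int) < 40)
        constructor <;> simp <;> omega)]
  rw [List.foldl_map]
  apply PySem.List.foldl_congr_mem
  intro acc q hq
  have hnn : 0 ≤ q.1 := enumerate_fst_nonneg answers q hq
  have hmod : (q.1 % 40) % (p.length : Int) = q.1 % (p.length : Int) :=
    Int.emod_emod_of_dvd q.1 hdvd
  simp only [hmod]

theorem mock_exam_eq (answers : List Int) : mock_exam answers = mock_exam_alt answers := by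
  unfold mock_exam mock_exam_alt
  simp only [fold3, List.map_cons, List.map_nil]
  simp only [score_eq answers [1,2,3,4,5] (by decide),
      score_eq answers [2,1,2,3,2,4,2,5] (by decide),
      score_eq answers [3,3,1,1,2,2,4,4,5,5] (by decide)]
  simp only [List.length_cons, List.length_nil]
  norm_num [PySem.List.enumerate_cons, PySem.List.enumerate_nil, List.range_succ]

-- ===== VERDICT (by name: the statement is the Claim_ definition above) =====
theorem mock_exam_spec : Claim_equal_mock_exam := by
  intro answers _
  unfold Spec_mock_exam
  exact mock_exam_eq answers
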